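-- pv_equiv track=rewrite | github.com/kristopher-miles/threadspeak-audiobook | app/script_sanity.py | _find_sentence_left_boundary
-- ===== SOURCE A (Python) =====
-- def _find_sentence_left_boundary(text, index):
--     text = text or ""
--     index = max(0, min(len(text), int(index or 0)))
--     candidates = [pos for pos in (
--         text.rfind(". ", 0, index),
--         text.rfind("! ", 0, index),
--         text.rfind("? ", 0, index),
--         text.rfind("\n\n", 0, index),
--     ) if pos != -1]
--     if not candidates:
--         return 0
--     left = max(candidates)
--     return left + 2
-- ===== SOURCE B (Python) =====
-- def _find_sentence_left_boundary(text, index):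
--     text = text or ""
--     index = max(0, min(len(text), int(index or 0)))
--     left = -1
--     for i in range(0, index - 1):
--         if text[i:i+2] in (". ", "! ", "? ", "\n\n"):
--             left = i
--     return left + 2 if left >= 0 else 0
-- ===== Notes on version B (the rewrite author's own statement) =====
-- stated objective: alternative
-- what changed: Replaces the four backward rfind scans plus filter/max with a single forward pass over the prefix that keeps the last (highest) delimiter position seen, returning left+2 or 0.
import Mathlib
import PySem

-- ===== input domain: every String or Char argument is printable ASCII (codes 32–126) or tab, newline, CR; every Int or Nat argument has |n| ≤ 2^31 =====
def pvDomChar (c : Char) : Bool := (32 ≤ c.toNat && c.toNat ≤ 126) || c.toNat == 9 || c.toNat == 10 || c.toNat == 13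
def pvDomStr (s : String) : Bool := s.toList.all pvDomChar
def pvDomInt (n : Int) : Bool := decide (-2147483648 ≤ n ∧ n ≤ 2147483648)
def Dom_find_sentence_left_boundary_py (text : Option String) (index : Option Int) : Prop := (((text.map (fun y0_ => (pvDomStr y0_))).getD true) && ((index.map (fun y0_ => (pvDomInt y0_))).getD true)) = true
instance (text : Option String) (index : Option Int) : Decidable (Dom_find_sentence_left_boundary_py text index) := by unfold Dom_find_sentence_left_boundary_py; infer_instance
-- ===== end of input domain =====

-- B replaces the four backward rfind scans + max with one forward pass over the prefix
-- that records the last delimiter position (alternative decomposition, same asymptotic cost).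

-- ===== PORT A =====
def find_sentence_left_boundary_py (text : Option String) (index : Option Int) : Int :=
  let t := text.getD ""                                   -- text = text or ""  ("" is falsy, so getD "" is exact)
  let idx := max 0 (min (PySem.Str.len t) (index.getD 0)) -- index = max(0, min(len(text), int(index or 0)))
  let candidates := [PySem.Str.rfindFrom t ". " 0 (some idx),
                     PySem.Str.rfindFrom t "! " 0 (some idx),
                     PySem.Str.rfindFrom t "? " 0 (some idx),
                     PySem.Str.rfindFrom t "\n\n" 0 (some idx)].filter (fun pos => pos ≠ -1)
  match PySem.List.max? candidates (fun y => y) with                -- if not candidates: return 0 / max(candidates) + 2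
  | none => 0
  | some left => left + 2

-- ===== PORT B =====
def find_sentence_left_boundary_py_alt (text : Option String) (index : Option Int) : Int :=
  let t := text.getD ""
  let idx := max 0 (min (PySem.Str.len t) (index.getD 0))
  let left := (PySem.List.pyRange 0 (idx - 1) 1).foldl (fun acc i =>
      if (PySem.Str.slice t (some i) (some (i + 2)) == ". ") ||
         (PySem.Str.slice t (some i) (some (i + 2)) == "! ") ||
         (PySem.Str.slice t (some i) (some (i + 2)) == "? ") ||
         (PySem.Str.slice t (some i) (some (i + 2)) == "\n\n") then i else acc) (-1)
  if 0 ≤ left then left + 2 else 0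

-- ===== PRECONDITION & SPEC =====
def Spec_find_sentence_left_boundary_py (text : Option String) (index : Option Int) (out : Int) : Prop := out = find_sentence_left_boundary_py_alt text index
instance (text : Option String) (index : Option Int) (out : Int) : Decidable (Spec_find_sentence_left_boundary_py text index out) := by unfold Spec_find_sentence_left_boundary_py; infer_instance

-- ===== CLAIM (what is proved, stated in full; the proofs are below) =====
def Claim_equal_find_sentence_left_boundary_py : Prop := ∀ (text : Option String) (index : Option Int), Dom_find_sentence_left_boundary_py text index → Spec_find_sentence_left_boundary_py text index (find_sentence_left_boundary_py text index)

-- ===== LEMMAS AND PROOFS =====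

/-- Position of the last `i < m` with `q i`, as an `Int`; `-1` if none. -/
def lastHit (q : Nat → Bool) : Nat → Int
  | 0 => -1
  | m + 1 => if q m then (m : Int) else lastHit q m

theorem neg_one_le_lastHit (q : Nat → Bool) (m : Nat) : -1 ≤ lastHit q m := by
  induction m with
  | zero => simp [lastHit]
  | succ m ih =>
      simp only [lastHit]
      split
      · omega
      · exact ih

theorem lastHit_lt (q : Nat → Bool) (m : Nat) : lastHit q m < (m : Int) := by
  induction m with
  | zero => simp [lastHit]
  | succ m ih =>
      simp only [lastHit]
      split
      · push_cast; omega
      · exact lt_trans ih (by push_cast; omega)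

theorem lastHit_congr (q q' : Nat → Bool) (m : Nat) (h : ∀ i, i < m → q i = q' i) :
    lastHit q m = lastHit q' m := by
  induction m with
  | zero => rfl
  | succ m ih =>
      simp only [lastHit, h m (Nat.lt_succ_self m)]
      rw [ih (fun i hi => h i (Nat.lt_succ_of_lt hi))]

theorem lastHit_extend_false (q : Nat → Bool) (m m' : Nat) (hmm : m ≤ m')
    (h : ∀ i, m ≤ i → i < m' → q i = false) : lastHit q m' = lastHit q m := by
  induction m' with
  | zero =>
      have : m = 0 := by omega
      rw [this]
  | succ m' ih =>
      rcases Nat.lt_or_ge m (m' + 1) with hlt | hge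
      · have hm' : m ≤ m' := by omega
        simp only [lastHit, h m' hm' (Nat.lt_succ_self m')]
        exact ih hm' (fun i h1 h2 => h i h1 (Nat.lt_succ_of_lt h2))
      · have : m = m' + 1 := by omega
        rw [this]

theorem lastHit_or (q1 q2 : Nat → Bool) (m : Nat) :
    lastHit (fun i => q1 i || q2 i) m = max (lastHit q1 m) (lastHit q2 m) := by
  induction m with
  | zero => simp [lastHit]
  | succ m ih =>
      have h1 := lastHit_lt q1 m
      have h2 := lastHit_lt q2 m
      simp only [lastHit, ih]
      cases hq1 : q1 m <;> cases hq2 : q2 m <;> simp [Int.max_def] <;> intros <;> omega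

theorem go_eq_lastHit (s sub : List Char) (k : Nat) :
    PySem.Chars.rfind.go s sub k = lastHit (fun j => sub.isPrefixOf (s.drop j)) (k + 1) := by
  induction k with
  | zero => rw [PySem.Chars.rfind.go.eq_def]; simp [lastHit]
  | succ k ih => rw [PySem.Chars.rfind.go.eq_def]; simp only [lastHit, ih]

theorem foldl_pyRange_lastHit (Q : Int → Bool) (m : Nat) :
    (PySem.List.pyRange 0 (m : Int) 1).foldl (fun acc i => if Q i then i else acc) (-1)
      = lastHit (fun j => Q (j : Int)) m := by
  induction m with
  | zero => simp [PySem.List.pyRange_one_eq_nil, lastHit]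
  | succ m ih =>
      have : ((m : Int) + 1) = ((m + 1 : Nat) : Int) := by push_cast; ring
      rw [show ((m + 1 : Nat) : Int) = (m : Int) + 1 by push_cast; ring,
          PySem.List.pyRange_one_succ_right (a:=0) (b:=(m:Int)) (by omega),
          List.foldl_append, ih]
      simp [lastHit]

theorem take2_eq_iff_prefix (l p : List Char) (hp : p.length = 2) :
    (l.take 2 = p) ↔ p <+: l := by
  constructor
  · intro h; rw [← h]; exact List.take_prefix 2 l
  · intro h; rw [List.prefix_iff_eq_take.mp h, hp]

theorem rfindFrom_eq_lastHit (cs p : List Char) (hp : p.length = 2) (k : Nat) (hk : k ≤ cs.length) :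
    PySem.Chars.rfindFrom cs p 0 (some (k : Int))
      = lastHit (fun j => p.isPrefixOf (cs.drop j)) (k - 1) := by
  have hlen : (cs.take k).length = k := by simp [hk]
  have hstep1 : lastHit (fun j => p.isPrefixOf ((cs.take k).drop j)) (k + 1)
      = lastHit (fun j => p.isPrefixOf ((cs.take k).drop j)) (k - 1) := by
    apply lastHit_extend_false _ _ _ (by omega)
    intro i h1 h2
    rw [Bool.eq_false_iff]
    intro hpre
    have hle := (List.isPrefixOf_iff_prefix.mp hpre).length_le
    rw [List.length_drop, hlen, hp] at hle
    omega
  have hstep2 : lastHit (fun j => p.isPrefixOf ((cs.take k).drop j)) (k - 1)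
      = lastHit (fun j => p.isPrefixOf (cs.drop j)) (k - 1) := by
    apply lastHit_congr
    intro i hi
    rw [Bool.eq_iff_iff]
    simp only [List.isPrefixOf_iff_prefix, List.drop_take]
    exact ⟨fun h => (List.prefix_take_iff.mp h).1,
           fun h => List.prefix_take_iff.mpr ⟨h, by omega⟩⟩
  have hkc : ¬ ((cs.length : Int) < (k : Int)) := by exact_mod_cast not_lt.mpr hk
  have hk0 : ¬ ((k : Int) < 0) := by omega
  simp only [PySem.Chars.rfindFrom, PySem.Chars.rfind, hkc, hk0, lt_self_iff_false, if_false,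
    Int.toNat_zero, List.drop_zero, Int.toNat_natCast, hlen, go_eq_lastHit, hstep1, hstep2,
    zero_add]
  have hge := neg_one_le_lastHit (fun j => p.isPrefixOf (cs.drop j)) (k - 1)
  by_cases h : lastHit (fun j => p.isPrefixOf (cs.drop j)) (k - 1) = -1
  · simp [h]
  · simp [h]

theorem slice_beq_prefix (t p : String) (hp : p.toList.length = 2) (j : Nat) :
    (PySem.Str.slice t (some (j : Int)) (some ((j : Int) + 2)) == p)
      = p.toList.isPrefixOf (t.toList.drop j) := by
  rw [Bool.eq_iff_iff, beq_iff_eq, List.isPrefixOf_iff_prefix, ← String.toList_inj,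
    PySem.Str.toList_slice, PySem.Chars.slice_eq_listSlice,
    show ((j : Int) + 2) = ((j + 2 : Nat) : Int) by push_cast; ring,
    PySem.List.slice_natCast, show j + 2 - j = 2 by omega]
  exact take2_eq_iff_prefix _ _ hp

theorem max?_nil_int : PySem.List.max? ([] : List Int) (fun y => y) = none := rfl

theorem glue (v1 v2 v3 v4 : Int) (h1 : -1 ≤ v1) (h2 : -1 ≤ v2) (h3 : -1 ≤ v3) (h4 : -1 ≤ v4) :
    (match PySem.List.max? ([v1, v2, v3, v4].filter (fun pos => pos ≠ -1)) (fun y => y) with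
     | none => 0
     | some left => left + 2)
    = (if 0 ≤ max (max (max v1 v2) v3) v4 then max (max (max v1 v2) v3) v4 + 2 else 0) := by
  rcases (by omega : v1 = -1 ∨ (v1 ≠ -1 ∧ 0 ≤ v1)) with e1 | ⟨e1, g1⟩ <;>
  rcases (by omega : v2 = -1 ∨ (v2 ≠ -1 ∧ 0 ≤ v2)) with e2 | ⟨e2, g2⟩ <;>
  rcases (by omega : v3 = -1 ∨ (v3 ≠ -1 ∧ 0 ≤ v3)) with e3 | ⟨e3, g3⟩ <;>
  rcases (by omega : v4 = -1 ∨ (v4 ≠ -1 ∧ 0 ≤ v4)) with e4 | ⟨e4, g4⟩ <;>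
  simp [e1, e2, e3, e4, PySem.List.max?_id_cons, max?_nil_int, Int.max_def] <;>
  split_ifs <;> (try simp) <;> omega

-- ===== VERDICT (by name: the statement is the Claim_ definition above) =====
theorem find_sentence_left_boundary_py_spec : Claim_equal_find_sentence_left_boundary_py := by
  intro text index _
  simp only [Spec_find_sentence_left_boundary_py, find_sentence_left_boundary_py,
    find_sentence_left_boundary_py_alt]
  set t := text.getD "" with ht
  set idx := max 0 (min (PySem.Str.len t) (index.getD 0)) with hidx
  have h0 : 0 ≤ idx := le_max_left _ _
  have h1 : idx ≤ (t.toList.length : Int) := by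
    rw [hidx]
    apply max_le
    · exact_mod_cast Int.natCast_nonneg _
    · rw [PySem.Str.len_eq]; exact min_le_left _ _
  set k := idx.toNat with hkdef
  have hik : idx = (k : Int) := (Int.toNat_of_nonneg h0).symm
  have hk : k ≤ t.toList.length := by omega
  simp only [PySem.Str.rfindFrom_eq, hik]
  rw [rfindFrom_eq_lastHit _ _ (by decide) k hk, rfindFrom_eq_lastHit _ _ (by decide) k hk,
      rfindFrom_eq_lastHit _ _ (by decide) k hk, rfindFrom_eq_lastHit _ _ (by decide) k hk]
  rcases Nat.eq_zero_or_pos k with hk0 | hk1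
  · simp [hk0, lastHit, max?_nil_int]
  · rw [show ((k : Int) - 1) = ((k - 1 : Nat) : Int) by omega, foldl_pyRange_lastHit]
    rw [lastHit_congr
        (fun j => (PySem.Str.slice t (some (j : Int)) (some ((j : Int) + 2)) == ". " ||
                   PySem.Str.slice t (some (j : Int)) (some ((j : Int) + 2)) == "! " ||
                   PySem.Str.slice t (some (j : Int)) (some ((j : Int) + 2)) == "? " ||
                   PySem.Str.slice t (some (j : Int)) (some ((j : Int) + 2)) == "\n\n"))
        (fun j => (". ".toList.isPrefixOf (t.toList.drop j) ||
                   "! ".toList.isPrefixOf (t.toList.drop j) ||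
                   "? ".toList.isPrefixOf (t.toList.drop j) ||
                   "\n\n".toList.isPrefixOf (t.toList.drop j))) (k - 1)
        (fun i _ => by
          simp only [slice_beq_prefix t ". " (by decide) i, slice_beq_prefix t "! " (by decide) i,
            slice_beq_prefix t "? " (by decide) i, slice_beq_prefix t "\n\n" (by decide) i]),
      lastHit_or, lastHit_or, lastHit_or]
    exact glue _ _ _ _ (neg_one_le_lastHit _ _) (neg_one_le_lastHit _ _)
      (neg_one_le_lastHit _ _) (neg_one_le_lastHit _ _)
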